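-- pv_equiv track=rewrite | github.com/troutnodoubt/AdventOfCode | 2015/adventofcode2015_day3.py | findvisited
-- ===== SOURCE A (Python) =====
-- def findvisited(instructions):
--     coordinate=[0,0]
--     visited={tuple(coordinate):1}
--     for heading in instructions:
--         if heading == '^':
--             coordinate[0]+=1
--         elif heading=='v':
--             coordinate[0]+=-1
--         elif heading == '>':
--             coordinate[1]+=1
--         elif heading == '<':
--             coordinate[1]+=-1
--
--         if tuple(coordinate) in visited.keys():
--             visited[tuple(coordinate)]+=1
--         else:
--             visited.update({tuple(coordinate):1})
--     return(visited)
-- ===== SOURCE B (Python) =====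
-- def findvisited(instructions):
--     # Divide and conquer: a half's visit counter is computed independently
--     # (relative to its own starting point), then the right half's counter is
--     # translated by the left half's net displacement and merged in.
--     def solve(s):
--         # returns (net displacement, counter of positions visited after each
--         # char of s, relative to the start of s; start itself not counted)
--         n = len(s)
--         if n == 0:
--             return (0, 0), {}
--         if n == 1:
--             c = s[0]
--             if c == '^':
--                 d = (1, 0)
--             elif c == 'v':
--                 d = (-1, 0)
--             elif c == '>':
--                 d = (0, 1)
--             elif c == '<':
--                 d = (0, -1)
--             else:
--                 d = (0, 0)
--             return d, {d: 1}
--         m = n // 2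
--         (ex, ey), left = solve(s[:m])
--         (fx, fy), right = solve(s[m:])
--         for (px, py), k in right.items():
--             q = (ex + px, ey + py)
--             left[q] = left.get(q, 0) + k
--         return (ex + fx, ey + fy), left
--
--     _, counts = solve(instructions)
--     visited = {(0, 0): 1}
--     for p, k in counts.items():
--         visited[p] = visited.get(p, 0) + k
--     return visited
-- ===== Notes on version B (the rewrite author's own statement) =====
-- stated objective: alternative
-- what changed: A walks the string once left-to-right, moving a mutable position and bumping a dict as it goes; B is a divide-and-conquer: it recursively solves the two halves of the string independently (each relative to its own start), then translates the right half's counter by the left half's net displacement and merges the two counters.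
import Mathlib
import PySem

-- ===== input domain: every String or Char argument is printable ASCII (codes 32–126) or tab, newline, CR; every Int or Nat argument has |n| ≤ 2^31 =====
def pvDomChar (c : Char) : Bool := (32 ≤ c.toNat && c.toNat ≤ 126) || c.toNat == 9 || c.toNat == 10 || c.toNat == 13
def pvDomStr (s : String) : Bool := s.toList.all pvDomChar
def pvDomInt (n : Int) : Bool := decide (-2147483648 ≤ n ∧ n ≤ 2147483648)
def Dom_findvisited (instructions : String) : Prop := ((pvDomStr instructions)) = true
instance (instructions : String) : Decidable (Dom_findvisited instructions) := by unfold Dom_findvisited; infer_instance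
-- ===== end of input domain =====

-- B replaces A's single left-to-right walk by a divide-and-conquer: each half of the string is
-- solved independently relative to its own start, and the right half's counter is translated by
-- the left half's net displacement and merged in; objective: alternative, same result.

-- ===== PORT A =====
def findvisitedStep (st : (Int × Int) × PySem.Dict (Int × Int) Int) (heading : Char) :
    (Int × Int) × PySem.Dict (Int × Int) Int :=
  let c := st.1
  let c' :=
    if heading == '^' then (c.1 + 1, c.2)
    else if heading == 'v' then (c.1 + (-1), c.2)
    else if heading == '>' then (c.1, c.2 + 1)
    else if heading == '<' then (c.1, c.2 + (-1))
    else c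
  let vis := st.2
  let vis' := if vis.contains c' then vis.insert c' (vis.getD c' 0 + 1) else vis.insert c' 1
  (c', vis')

def findvisited (instructions : String) : List (Int × Int × Int) :=
  ((instructions.toList.foldl findvisitedStep
      (((0, 0) : Int × Int), PySem.Dict.ofList [(((0, 0) : Int × Int), (1 : Int))])).2).items.map
    (fun p => (p.1.1, p.1.2, p.2))

-- ===== PORT B =====
def deltaOf (c : Char) : Int × Int :=
  if c == '^' then (1, 0)
  else if c == 'v' then (-1, 0)
  else if c == '>' then (0, 1)
  else if c == '<' then (0, -1)
  else (0, 0)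

/-- Source B's `solve`: divide and conquer over the character list. -/
def solveB : List Char → (Int × Int) × PySem.Dict (Int × Int) Int
  | [] => ((0, 0), PySem.Dict.empty)
  | [c] => (deltaOf c, PySem.Dict.empty.insert (deltaOf c) 1)
  | c1 :: c2 :: rest =>
      let s := c1 :: c2 :: rest
      let m := s.length / 2
      let L := solveB (s.take m)
      let R := solveB (s.drop m)
      let merged := R.2.items.foldl
        (fun (d : PySem.Dict (Int × Int) Int) pk =>
          d.insert (L.1.1 + pk.1.1, L.1.2 + pk.1.2)
            (d.getD (L.1.1 + pk.1.1, L.1.2 + pk.1.2) 0 + pk.2)) L.2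
      ((L.1.1 + R.1.1, L.1.2 + R.1.2), merged)
  termination_by cs => cs.length
  decreasing_by
  · simp [List.length_take]; omega
  · simp [List.length_drop]; omega

def findvisited_alt (instructions : String) : List (Int × Int × Int) :=
  (((solveB instructions.toList).2).items.foldl
      (fun (d : PySem.Dict (Int × Int) Int) pk => d.insert pk.1 (d.getD pk.1 0 + pk.2))
      (PySem.Dict.ofList [(((0, 0) : Int × Int), (1 : Int))])).items.map
    (fun p => (p.1.1, p.1.2, p.2))

-- ===== PRECONDITION & SPEC =====
def Spec_findvisited (instructions : String) (out : List (Int × Int × Int)) : Prop := out = findvisited_alt instructions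
instance (instructions : String) (out : List (Int × Int × Int)) : Decidable (Spec_findvisited instructions out) := by unfold Spec_findvisited; infer_instance

-- ===== CLAIM (what is proved, stated in full; the proofs are below) =====
def Claim_equal_findvisited : Prop := ∀ (instructions : String), Dom_findvisited instructions → Spec_findvisited instructions (findvisited instructions)

-- ===== LEMMAS AND PROOFS =====

/-- one visit: bump the counter at position p -/
def pvBump (d : PySem.Dict (Int × Int) Int) (p : Int × Int) : PySem.Dict (Int × Int) Int :=
  d.insert p (d.getD p 0 + 1)

/-- one merge step: add k visits at position pk.1 -/
def pvBumpK (d : PySem.Dict (Int × Int) Int) (pk : (Int × Int) × Int) : PySem.Dict (Int × Int) Int :=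
  d.insert pk.1 (d.getD pk.1 0 + pk.2)

/-- merge counter e into d -/
def pvMerge (d e : PySem.Dict (Int × Int) Int) : PySem.Dict (Int × Int) Int :=
  e.items.foldl pvBumpK d

def pvShift (v p : Int × Int) : Int × Int := (v.1 + p.1, v.2 + p.2)

/-- translate every key of a counter by v -/
def pvMapK (v : Int × Int) (e : PySem.Dict (Int × Int) Int) : PySem.Dict (Int × Int) Int :=
  PySem.Dict.mk (e.items.map (fun pk => (pvShift v pk.1, pk.2)))

def pvMove (c : Int × Int) (h : Char) : Int × Int :=
  (c.1 + (deltaOf h).1, c.2 + (deltaOf h).2)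

/-- the positions visited after each instruction, starting at c (c itself excluded) -/
def pvTrail (c : Int × Int) : List Char → List (Int × Int)
  | [] => []
  | h :: t => pvMove c h :: pvTrail (pvMove c h) t

def pvEnd (c : Int × Int) (cs : List Char) : Int × Int := cs.foldl pvMove c

theorem pv_coord_step (h : Char) (c : Int × Int) :
    (if h == '^' then (c.1 + 1, c.2)
     else if h == 'v' then (c.1 + (-1), c.2)
     else if h == '>' then (c.1, c.2 + 1)
     else if h == '<' then (c.1, c.2 + (-1))
     else c) = pvMove c h := by
  simp only [pvMove, deltaOf]
  split_ifs <;> simp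

theorem pv_dict_step (vis : PySem.Dict (Int × Int) Int) (c' : Int × Int) :
    (if vis.contains c' then vis.insert c' (vis.getD c' 0 + 1) else vis.insert c' 1)
      = pvBump vis c' := by
  unfold pvBump
  by_cases hc : vis.contains c'
  · simp [hc]
  · have h0 : vis.getD c' 0 = 0 :=
      PySem.Dict.getD_of_not_contains vis 0 (by simpa using hc)
    simp [hc, h0]

theorem pv_foldA (cs : List Char) (c : Int × Int) (vis : PySem.Dict (Int × Int) Int) :
    (cs.foldl findvisitedStep (c, vis)).2 = (pvTrail c cs).foldl pvBump vis := by
  induction cs generalizing c vis with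
  | nil => rfl
  | cons h t ih =>
      have hstep : findvisitedStep (c, vis) h = (pvMove c h, pvBump vis (pvMove c h)) := by
        simp only [findvisitedStep, pv_coord_step, pv_dict_step]
      simp only [List.foldl_cons, hstep, pvTrail, ih]

theorem pvEnd_append (l r : List Char) (c : Int × Int) :
    pvEnd c (l ++ r) = pvEnd (pvEnd c l) r :=
  List.foldl_append

theorem pvTrail_append (l r : List Char) (c : Int × Int) :
    pvTrail c (l ++ r) = pvTrail c l ++ pvTrail (pvEnd c l) r := by
  induction l generalizing c with
  | nil => simp [pvTrail, pvEnd]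
  | cons h t ih => simp [pvTrail, pvEnd, List.foldl_cons, ih]

theorem pvMove_shift (v c : Int × Int) (h : Char) :
    pvMove (pvShift v c) h = pvShift v (pvMove c h) := by
  simp [pvMove, pvShift, add_assoc]

theorem pvTrail_shift (v : Int × Int) (cs : List Char) (c : Int × Int) :
    pvTrail (pvShift v c) cs = (pvTrail c cs).map (pvShift v) := by
  induction cs generalizing c with
  | nil => rfl
  | cons h t ih => simp [pvTrail, pvMove_shift, ih]

theorem pvEnd_shift (v : Int × Int) (cs : List Char) (c : Int × Int) :
    pvEnd (pvShift v c) cs = pvShift v (pvEnd c cs) := by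
  induction cs generalizing c with
  | nil => rfl
  | cons h t ih =>
      show List.foldl pvMove (pvMove (pvShift v c) h) t = pvShift v (List.foldl pvMove (pvMove c h) t)
      rw [pvMove_shift]
      exact ih (pvMove c h)

theorem pvShift_zero (v : Int × Int) : pvShift v (0, 0) = v := by
  simp [pvShift]

theorem pvEnd_abs (c : Int × Int) (cs : List Char) :
    pvEnd c cs = pvShift c (pvEnd (0, 0) cs) := by
  rw [← pvEnd_shift, pvShift_zero]

theorem pvTrail_abs (c : Int × Int) (cs : List Char) :
    pvTrail c cs = (pvTrail (0, 0) cs).map (pvShift c) := by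
  rw [← pvTrail_shift, pvShift_zero]

theorem pvShift_inj (v a b : Int × Int) : pvShift v a = pvShift v b ↔ a = b := by
  constructor
  · intro h
    have h1 := congrArg Prod.fst h
    have h2 := congrArg Prod.snd h
    simp [pvShift] at h1 h2
    exact Prod.ext h1 h2
  · intro h; rw [h]

theorem pv_insert_comm (d : PySem.Dict (Int × Int) Int) (p q : Int × Int) (v w : Int)
    (hp : d.contains p = true) (hqp : q ≠ p) :
    (d.insert p v).insert q w = (d.insert q w).insert p v := by
  apply PySem.Dict.ext
  by_cases hq : d.contains q = true
  · rw [PySem.Dict.items_insert_of_contains _ w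
        (by rw [PySem.Dict.contains_insert]; simp [hq]),
      PySem.Dict.items_insert_of_contains _ v hp,
      PySem.Dict.items_insert_of_contains _ v
        (by rw [PySem.Dict.contains_insert]; simp [hp]),
      PySem.Dict.items_insert_of_contains _ w hq]
    rw [List.map_map, List.map_map]
    apply List.map_congr_left
    intro x _
    by_cases h1 : x.1 = p <;> by_cases h2 : x.1 = q <;>
      simp_all [Function.comp, Ne.symm hqp]
  · have hq0 : d.contains q = false := by simpa using hq
    have hq1 : (d.insert p v).contains q = false := by
      rw [PySem.Dict.contains_insert]; simp [hq0, hqp]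
    have hp1 : (d.insert q w).contains p = true := by
      rw [PySem.Dict.contains_insert]; simp [hp]
    rw [PySem.Dict.items_insert_of_not_contains _ w hq1,
      PySem.Dict.items_insert_of_contains _ v hp,
      PySem.Dict.items_insert_of_contains _ v hp1,
      PySem.Dict.items_insert_of_not_contains _ w hq0,
      List.map_append]
    simp [hqp]

theorem pv_foldl_bumpK_getD (l : List ((Int × Int) × Int)) (d : PySem.Dict (Int × Int) Int)
    (p : Int × Int) (hp : p ∉ l.map Prod.fst) :
    (l.foldl pvBumpK d).getD p 0 = d.getD p 0 := by
  induction l generalizing d with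
  | nil => rfl
  | cons q t ih =>
      simp only [List.map_cons, List.mem_cons, not_or] at hp
      rw [List.foldl_cons, ih _ hp.2]
      exact PySem.Dict.getD_insert_of_ne _ _ _ hp.1

theorem pv_foldl_bumpK_insert (l : List ((Int × Int) × Int)) (d : PySem.Dict (Int × Int) Int)
    (p : Int × Int) (w : Int) (hp : p ∉ l.map Prod.fst) (hc : d.contains p = true) :
    l.foldl pvBumpK (d.insert p w) = (l.foldl pvBumpK d).insert p w := by
  induction l generalizing d with
  | nil => rfl
  | cons q t ih =>
      simp only [List.map_cons, List.mem_cons, not_or] at hp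
      have hqp : q.1 ≠ p := fun h => hp.1 h.symm
      rw [List.foldl_cons, List.foldl_cons]
      have h1 : pvBumpK (d.insert p w) q = (pvBumpK d q).insert p w := by
        unfold pvBumpK
        rw [PySem.Dict.getD_insert_of_ne _ _ _ hqp]
        exact pv_insert_comm d p q.1 w _ hc hqp
      rw [h1, ih _ hp.2 (by
        show (d.insert q.1 _).contains p = true
        rw [PySem.Dict.contains_insert]; simp [hc])]

theorem pv_foldl_bumpK_replace (l : List ((Int × Int) × Int)) (d : PySem.Dict (Int × Int) Int)
    (p : Int × Int) (hnd : (l.map Prod.fst).Nodup) (hp : p ∈ l.map Prod.fst) :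
    (l.map (fun q => if q.1 == p then (p, q.2 + 1) else q)).foldl pvBumpK d
      = pvBump (l.foldl pvBumpK d) p := by
  induction l generalizing d with
  | nil => simp at hp
  | cons q t ih =>
      simp only [List.map_cons, List.nodup_cons] at hnd
      by_cases hq : q.1 = p
      · have hpt : p ∉ t.map Prod.fst := hq ▸ hnd.1
        have htid : t.map (fun x => if x.1 == p then (p, x.2 + 1) else x) = t := by
          apply List.map_congr_left ?_ |>.trans (List.map_id t)
          intro x hx
          have : x.1 ≠ p := fun h => hpt (h ▸ List.mem_map_of_mem hx)
          simp [this]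
        have hq1 : pvBumpK d q = d.insert p (d.getD p 0 + q.2) := by
          unfold pvBumpK; rw [hq]
        have e1 : pvBumpK d (p, q.2 + 1) = (pvBumpK d q).insert p (d.getD p 0 + (q.2 + 1)) := by
          rw [hq1, PySem.Dict.insert_insert_self]; rfl
        have hcont : (pvBumpK d q).contains p = true := by
          rw [hq1]; exact PySem.Dict.contains_insert_self _ _ _
        simp only [List.map_cons, List.foldl_cons, htid, hq, beq_self_eq_true, if_true]
        rw [show (p, q.2 + 1) = ((p, q.2 + 1) : (Int × Int) × Int) from rfl] at e1 ⊢
        rw [e1, pv_foldl_bumpK_insert t _ p _ hpt hcont]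
        unfold pvBump
        rw [pv_foldl_bumpK_getD t _ p hpt, hq1, PySem.Dict.getD_insert_self]
        congr 1
        ring
      · have hpmem : p ∈ t.map Prod.fst := by
          rcases List.mem_cons.mp hp with h | h
          · exact absurd h.symm hq
          · exact h
        have hq' : (q.1 == p) = false := by simp [hq]
        simp only [List.map_cons, hq', Bool.false_eq_true, List.foldl_cons]
        exact ih _ hnd.2 hpmem

theorem pv_merge_empty (d : PySem.Dict (Int × Int) Int) : pvMerge d PySem.Dict.empty = d := rfl

theorem pv_merge_bump (d e : PySem.Dict (Int × Int) Int) (p : Int × Int)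
    (hnd : e.keys.Nodup) :
    pvMerge d (pvBump e p) = pvBump (pvMerge d e) p := by
  unfold pvMerge pvBump
  by_cases hc : e.contains p = true
  · rw [PySem.Dict.items_insert_of_contains _ _ hc]
    have hkeys : e.keys = e.items.map Prod.fst := rfl
    have hnd' : (e.items.map Prod.fst).Nodup := hkeys ▸ hnd
    have hp' : p ∈ e.items.map Prod.fst := by
      have := hc
      unfold PySem.Dict.contains at this
      simp only [List.any_eq_true, beq_iff_eq] at this
      rcases this with ⟨x, hx, hxe⟩
      exact hxe ▸ List.mem_map_of_mem hx
    have hmap : e.items.map (fun q => if q.1 == p then (p, e.getD p 0 + 1) else q)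
        = e.items.map (fun q => if q.1 == p then (p, q.2 + 1) else q) := by
      apply List.map_congr_left
      intro x hx
      by_cases h1 : x.1 = p
      · have hx' : (p, x.2) ∈ e.items := by
          have : x = (x.1, x.2) := rfl
          rw [← h1]; exact this ▸ hx
        have hval : e.getD p 0 = x.2 := PySem.Dict.getD_of_mem_items e hx' hnd 0
        simp [h1, hval]
      · simp [h1]
    rw [hmap]
    exact pv_foldl_bumpK_replace e.items d p hnd' hp'
  · have hc' : e.contains p = false := by simpa using hc
    rw [PySem.Dict.getD_of_not_contains e 0 hc',
      PySem.Dict.items_insert_of_not_contains _ _ hc', List.foldl_append]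
    simp only [List.foldl_cons, List.foldl_nil]
    unfold pvBumpK
    norm_num

theorem pv_merge_foldl (ps : List (Int × Int)) (d e : PySem.Dict (Int × Int) Int)
    (hnd : e.keys.Nodup) :
    pvMerge d (ps.foldl pvBump e) = ps.foldl pvBump (pvMerge d e) := by
  induction ps generalizing d e with
  | nil => rfl
  | cons p t ih =>
      simp only [List.foldl_cons]
      rw [ih d (pvBump e p) (PySem.Dict.nodup_keys_insert e p _ hnd),
        pv_merge_bump d e p hnd]

theorem pv_mapK_get? (v : Int × Int) (e : PySem.Dict (Int × Int) Int) (p : Int × Int) :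
    (pvMapK v e).get? (pvShift v p) = e.get? p := by
  unfold pvMapK PySem.Dict.get?
  rw [List.find?_map]
  have hpred : ((fun (q : (Int × Int) × Int) => q.1 == pvShift v p) ∘
      (fun pk : (Int × Int) × Int => (pvShift v pk.1, pk.2)))
      = fun pk : (Int × Int) × Int => pk.1 == p := by
    funext pk
    simp [Function.comp, pvShift_inj]
  rw [hpred]
  cases e.items.find? (fun pk => pk.1 == p) <;> simp

theorem pv_mapK_getD (v : Int × Int) (e : PySem.Dict (Int × Int) Int) (p : Int × Int) :
    (pvMapK v e).getD (pvShift v p) 0 = e.getD p 0 := by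
  unfold PySem.Dict.getD
  rw [pv_mapK_get?]

theorem pv_mapK_contains (v : Int × Int) (e : PySem.Dict (Int × Int) Int) (p : Int × Int) :
    (pvMapK v e).contains (pvShift v p) = e.contains p := by
  unfold pvMapK PySem.Dict.contains
  simp only [List.any_map]
  congr 1
  funext x
  simp [Function.comp, pvShift_inj v x.1 p]

theorem pv_mapK_bump (v : Int × Int) (e : PySem.Dict (Int × Int) Int) (p : Int × Int) :
    pvMapK v (pvBump e p) = pvBump (pvMapK v e) (pvShift v p) := by
  unfold pvBump
  apply PySem.Dict.ext
  by_cases hc : e.contains p = true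
  · have hc2 : (pvMapK v e).contains (pvShift v p) = true := by
      rw [pv_mapK_contains]; exact hc
    show (PySem.Dict.mk ((e.insert p (e.getD p 0 + 1)).items.map
        (fun pk => (pvShift v pk.1, pk.2)))).items = _
    rw [PySem.Dict.items_insert_of_contains _ _ hc,
      PySem.Dict.items_insert_of_contains _ _ hc2, pv_mapK_getD]
    show (e.items.map _).map _ = ((pvMapK v e).items).map _
    unfold pvMapK
    rw [List.map_map, List.map_map]
    apply List.map_congr_left
    intro x _
    by_cases h1 : x.1 = p
    · simp [Function.comp, h1]
    · have h2 : pvShift v x.1 ≠ pvShift v p := fun h => h1 ((pvShift_inj v x.1 p).mp h)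
      simp [Function.comp, h1, h2]
  · have hc' : e.contains p = false := by simpa using hc
    have hc2 : (pvMapK v e).contains (pvShift v p) = false := by
      rw [pv_mapK_contains]; exact hc'
    show (PySem.Dict.mk ((e.insert p (e.getD p 0 + 1)).items.map
        (fun pk => (pvShift v pk.1, pk.2)))).items = _
    rw [PySem.Dict.items_insert_of_not_contains _ _ hc',
      PySem.Dict.items_insert_of_not_contains _ _ hc2, pv_mapK_getD]
    show (e.items ++ [(p, e.getD p 0 + 1)]).map _ = (pvMapK v e).items ++ _
    rw [List.map_append]
    rfl

theorem pv_mapK_foldl (v : Int × Int) (ps : List (Int × Int))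
    (e : PySem.Dict (Int × Int) Int) :
    pvMapK v (ps.foldl pvBump e) = (ps.map (pvShift v)).foldl pvBump (pvMapK v e) := by
  induction ps generalizing e with
  | nil => rfl
  | cons p t ih => simp only [List.foldl_cons, List.map_cons, ih, pv_mapK_bump]

theorem pv_mapK_empty (v : Int × Int) : pvMapK v PySem.Dict.empty = PySem.Dict.empty := rfl

theorem pv_merge_shift (v : Int × Int) (d e : PySem.Dict (Int × Int) Int) :
    e.items.foldl
      (fun (d : PySem.Dict (Int × Int) Int) pk =>
        d.insert (v.1 + pk.1.1, v.2 + pk.1.2)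
          (d.getD (v.1 + pk.1.1, v.2 + pk.1.2) 0 + pk.2)) d
      = pvMerge d (pvMapK v e) := by
  unfold pvMerge pvMapK
  show _ = (e.items.map _).foldl pvBumpK d
  rw [List.foldl_map]
  rfl

theorem solveB_spec (cs : List Char) :
    solveB cs = (pvEnd (0, 0) cs, (pvTrail (0, 0) cs).foldl pvBump PySem.Dict.empty) := by
  fun_induction solveB cs with
  | case1 => rfl
  | case2 c =>
      have hmv : pvMove (0, 0) c = deltaOf c := by simp [pvMove]
      simp [pvEnd, pvTrail, hmv, pvBump, PySem.Dict.getD_empty]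
  | case3 c1 c2 rest s m L R merged ihL ihR =>
      have hMdef : merged = R.2.items.foldl
          (fun (d : PySem.Dict (Int × Int) Int) pk =>
            d.insert (L.1.1 + pk.1.1, L.1.2 + pk.1.2)
              (d.getD (L.1.1 + pk.1.1, L.1.2 + pk.1.2) 0 + pk.2)) L.2 := rfl
      have hLdef : L = solveB (List.take m s) := rfl
      have hRdef : R = solveB (List.drop m s) := rfl
      have hs : (c1 :: c2 :: rest) = s := rfl
      rw [hMdef, hLdef, hRdef, ihL, ihR, hs]
      dsimp only
      have h1 : pvEnd (0, 0) s
          = pvShift (pvEnd (0, 0) (List.take m s)) (pvEnd (0, 0) (List.drop m s)) := by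
        conv_lhs => rw [← List.take_append_drop m s]
        rw [pvEnd_append, pvEnd_abs]
      have h2 : pvTrail (0, 0) s
          = pvTrail (0, 0) (List.take m s)
            ++ (pvTrail (0, 0) (List.drop m s)).map (pvShift (pvEnd (0, 0) (List.take m s))) := by
        conv_lhs => rw [← List.take_append_drop m s]
        rw [pvTrail_append, pvTrail_abs (pvEnd (0, 0) (List.take m s)) (List.drop m s)]
      refine Prod.ext ?_ ?_
      · rw [h1]; rfl
      · show _ = List.foldl pvBump PySem.Dict.empty (pvTrail (0, 0) s)
        rw [pv_merge_shift, pv_mapK_foldl, pv_mapK_empty,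
          pv_merge_foldl _ _ _ PySem.Dict.nodup_keys_empty, pv_merge_empty,
          h2, List.foldl_append]

-- ===== VERDICT (by name: the statement is the Claim_ definition above) =====
theorem findvisited_spec : Claim_equal_findvisited := by
  intro s _
  unfold Spec_findvisited findvisited findvisited_alt
  rw [pv_foldA, solveB_spec]
  have hmrg : ((pvTrail (0, 0) s.toList).foldl pvBump PySem.Dict.empty).items.foldl
      (fun (d : PySem.Dict (Int × Int) Int) pk => d.insert pk.1 (d.getD pk.1 0 + pk.2))
      (PySem.Dict.ofList [(((0, 0) : Int × Int), (1 : Int))])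
      = pvMerge (PySem.Dict.ofList [(((0, 0) : Int × Int), (1 : Int))])
          ((pvTrail (0, 0) s.toList).foldl pvBump PySem.Dict.empty) := rfl
  rw [hmrg, pv_merge_foldl _ _ _ PySem.Dict.nodup_keys_empty, pv_merge_empty]
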